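-- pv_equiv track=rewrite | github.com/abelraj20/2-7_Triple_Draw_CFRM | solver/plot_utils.py | pretty_seq
-- ===== SOURCE A (Python) =====
-- _LIMIT_STYLES = {
--     "k": {"color": "#90EE90", "label": "Check", "lw": 2},
--     "b": {"color": "#DC143C", "label": "Bet",   "lw": 2},
--     "c": {"color": "#90EE90", "label": "Call",  "lw": 2},
--     "f": {"color": "#87CEEB", "label": "Fold",  "lw": 2},
--     "r": {"color": "#DC143C", "label": "Raise", "lw": 2},
-- }
--
-- def _action_label(act: str) -> str:
--     if act in ("k", "b", "c", "f", "r"):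
--         return _LIMIT_STYLES[act]["label"]
--
--     # NL-ish
--     if act.startswith("b"):
--         return f"Bet {act[1:]}" if act != "ba" else "Bet All-in"
--     if act.startswith("r"):
--         return f"Raise {act[1:]}" if act != "ra" else "Raise All-in"
--     return act.upper()
--
-- def pretty_seq(seq: str) -> str:
--     if seq == "":
--         return "Start"
--
--     # Tokenize NL sequences like "kb40r86ra"
--     # Greedy parse: k/c/f single, else b\d+|ba or r\d+|ra
--     tokens = []
--     i = 0
--     while i < len(seq):
--         ch = seq[i]
--         if ch in ("k", "c", "f"):
--             tokens.append(ch)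
--             i += 1
--             continue
--         if ch in ("b", "r"):
--             j = i + 1
--             while j < len(seq) and (seq[j].isdigit() or seq[j] == "a"):
--                 j += 1
--             tokens.append(seq[i:j])
--             i = j
--             continue
--         tokens.append(ch)
--         i += 1
--
--     return " - ".join(_action_label(t) for t in tokens)
-- ===== SOURCE B (Python) =====
-- _SIMPLE = {"k": "Check", "c": "Call", "f": "Fold"}
--
-- def pretty_seq(seq: str) -> str:
--     if seq == "":
--         return "Start"
--     labels = []
--     pend = None  # (kind_label, suffix) for an open b/r token
--
--     def flush():
--         nonlocal pend
--         if pend is not None: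
--             kind, s = pend
--             if s == "":
--                 labels.append(kind)
--             elif s == "a":
--                 labels.append(kind + " All-in")
--             else:
--                 labels.append(kind + " " + s)
--             pend = None
--
--     for ch in seq:
--         if pend is not None and (ch.isdigit() or ch == "a"):
--             pend = (pend[0], pend[1] + ch)
--             continue
--         flush()
--         if ch in _SIMPLE:
--             labels.append(_SIMPLE[ch])
--         elif ch == "b":
--             pend = ("Bet", "")
--         elif ch == "r":
--             pend = ("Raise", "")
--         else:
--             labels.append(ch.upper())
--     flush()
--     return " - ".join(labels)
-- ===== Notes on version B (the rewrite author's own statement) =====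
-- stated objective: alternative
-- what changed: Replaced A's tokenize-then-label two-phase design (index-advancing outer while with an inner digit-scanning while over string slices, then a labelling pass over the token list) with a single-pass state machine that never builds a token list: it emits each label directly, keeping only one pending (kind, suffix) pair for an open b/r amount.
import Mathlib
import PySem

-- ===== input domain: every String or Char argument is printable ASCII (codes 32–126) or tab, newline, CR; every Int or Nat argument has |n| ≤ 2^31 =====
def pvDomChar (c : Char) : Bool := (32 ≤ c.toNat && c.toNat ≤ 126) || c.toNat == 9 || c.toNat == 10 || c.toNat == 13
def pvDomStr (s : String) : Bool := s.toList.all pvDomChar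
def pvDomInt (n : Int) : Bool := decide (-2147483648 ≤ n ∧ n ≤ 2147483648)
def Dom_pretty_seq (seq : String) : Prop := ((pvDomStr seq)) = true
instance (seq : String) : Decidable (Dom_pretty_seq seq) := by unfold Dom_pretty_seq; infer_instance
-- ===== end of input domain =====

-- B replaces A's tokenize-then-label two-phase loop with a single-pass state machine
-- that emits labels directly (objective: alternative; same asymptotic cost).


-- ===== PORT A =====
-- seq[j].isdigit() or seq[j] == "a"  (exact on ASCII via PySem.Chars.isdigit)
def pvRunChar (c : Char) : Bool := PySem.Chars.isdigit c || c == 'a'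

-- the inner while loop: scan digits/'a' from position i+1 (takeWhile/dropWhile are its list form)
def pvTokA : List Char → List (List Char)
  | [] => []
  | c :: rest =>
    if c = 'k' ∨ c = 'c' ∨ c = 'f' then
      [c] :: pvTokA rest
    else if c = 'b' ∨ c = 'r' then
      (c :: rest.takeWhile pvRunChar) :: pvTokA (rest.dropWhile pvRunChar)
    else
      [c] :: pvTokA rest
  termination_by l => l.length
  decreasing_by
  · simp
  · simpa [Nat.lt_succ_iff] using rest.length_dropWhile_le pvRunChar
  · simp

-- _action_label, transliterated (startswith "b" = first char is 'b'; act[1:] = drop 1; upper via PySem)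
def pvActionLabel (act : List Char) : List Char :=
  if act = ['k'] then "Check".toList
  else if act = ['b'] then "Bet".toList
  else if act = ['c'] then "Call".toList
  else if act = ['f'] then "Fold".toList
  else if act = ['r'] then "Raise".toList
  else if act.take 1 = ['b'] then
    (if act ≠ ['b', 'a'] then "Bet ".toList ++ act.drop 1 else "Bet All-in".toList)
  else if act.take 1 = ['r'] then
    (if act ≠ ['r', 'a'] then "Raise ".toList ++ act.drop 1 else "Raise All-in".toList)
  else PySem.Chars.upper act

def pretty_seq (seq : String) : String :=
  if seq = "" then "Start"
  else String.ofList (PySem.Chars.join " - ".toList ((pvTokA seq.toList).map pvActionLabel))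

-- ===== PORT B =====
-- flush(): turn the pending (kind, suffix) pair, if any, into its label
def pvFlushB : Option (List Char × List Char) → List (List Char)
  | none => []
  | some (kind, s) =>
    [if s = [] then kind
     else if s = ['a'] then kind ++ " All-in".toList
     else kind ++ ' ' :: s]

-- the single for-loop over the characters, with labels accumulator and pending state
def pvGoB : List Char → Option (List Char × List Char) → List (List Char) → List (List Char)
  | [], pend, acc => acc ++ pvFlushB pend
  | c :: rest, pend, acc =>
    if pend.isSome && pvRunChar c then
      pvGoB rest (pend.map (fun ks => (ks.1, ks.2 ++ [c]))) acc
    else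
      let acc2 := acc ++ pvFlushB pend
      if c = 'k' then pvGoB rest none (acc2 ++ ["Check".toList])
      else if c = 'c' then pvGoB rest none (acc2 ++ ["Call".toList])
      else if c = 'f' then pvGoB rest none (acc2 ++ ["Fold".toList])
      else if c = 'b' then pvGoB rest (some ("Bet".toList, [])) acc2
      else if c = 'r' then pvGoB rest (some ("Raise".toList, [])) acc2
      else pvGoB rest none (acc2 ++ [PySem.Chars.upper [c]])

def pretty_seq_alt (seq : String) : String :=
  if seq = "" then "Start"
  else String.ofList (PySem.Chars.join " - ".toList (pvGoB seq.toList none []))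

-- ===== PRECONDITION & SPEC =====
def Spec_pretty_seq (seq : String) (out : String) : Prop := out = pretty_seq_alt seq
instance (seq : String) (out : String) : Decidable (Spec_pretty_seq seq out) := by unfold Spec_pretty_seq; infer_instance

-- ===== CLAIM (what is proved, stated in full; the proofs are below) =====
def Claim_equal_pretty_seq : Prop := ∀ (seq : String), Dom_pretty_seq seq → Spec_pretty_seq seq (pretty_seq seq)

-- ===== LEMMAS AND PROOFS =====

theorem pvGoB_acc (l : List Char) (pend : Option (List Char × List Char))
    (acc : List (List Char)) : pvGoB l pend acc = acc ++ pvGoB l pend [] := by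
  induction l generalizing pend acc with
  | nil => simp [pvGoB]
  | cons c rest ih =>
    simp only [pvGoB]
    by_cases hg : (pend.isSome && pvRunChar c) = true
    · rw [if_pos hg, if_pos hg, ih]
    · rw [if_neg hg, if_neg hg]
      split_ifs <;> rw [ih] <;> (conv_rhs => rw [ih]) <;> simp

theorem pvGoB_pend (l : List Char) (kind s : List Char) :
    pvGoB l (some (kind, s)) [] =
      pvFlushB (some (kind, s ++ l.takeWhile pvRunChar)) ++ pvGoB (l.dropWhile pvRunChar) none [] := by
  induction l generalizing s with
  | nil => simp [pvGoB, pvFlushB]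
  | cons c rest ih =>
    by_cases hc : pvRunChar c
    · have h1 : pvGoB (c :: rest) (some (kind, s)) [] = pvGoB rest (some (kind, s ++ [c])) [] := by
        simp [pvGoB, hc]
      rw [h1, ih, List.takeWhile_cons_of_pos hc, List.dropWhile_cons_of_pos hc]
      simp
    · rw [List.takeWhile_cons_of_neg hc, List.dropWhile_cons_of_neg hc]
      simp only [List.append_nil]
      -- with ¬pvRunChar c, processing (c :: rest) from the pending state first flushes,
      -- then behaves exactly like processing (c :: rest) with no pending state
      have hstep : pvGoB (c :: rest) (some (kind, s)) [] =
          pvGoB (c :: rest) none (pvFlushB (some (kind, s))) := by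
        simp only [pvGoB, hc, Option.isSome_some, Bool.and_false, Bool.false_eq_true, if_false,
          Option.isSome_none, pvFlushB, List.nil_append, List.append_nil]
      rw [hstep, pvGoB_acc]

theorem pvLabB (run : List Char) :
    pvFlushB (some ("Bet".toList, run)) = [pvActionLabel ('b' :: run)] := by
  match run with
  | [] => decide
  | [x] =>
    by_cases hx : x = 'a'
    · subst hx; decide
    · simp [pvFlushB, pvActionLabel, hx]
  | x :: y :: t =>
    simp [pvFlushB, pvActionLabel]

theorem pvLabR (run : List Char) :
    pvFlushB (some ("Raise".toList, run)) = [pvActionLabel ('r' :: run)] := by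
  match run with
  | [] => decide
  | [x] =>
    by_cases hx : x = 'a'
    · subst hx; decide
    · simp [pvFlushB, pvActionLabel, hx]
  | x :: y :: t =>
    simp [pvFlushB, pvActionLabel]

theorem pvMain (n : ℕ) (l : List Char) (hl : l.length ≤ n) :
    pvGoB l none [] = (pvTokA l).map pvActionLabel := by
  induction n generalizing l with
  | zero =>
    have : l = [] := List.eq_nil_of_length_eq_zero (Nat.le_zero.mp hl)
    subst this; simp [pvGoB, pvTokA, pvFlushB]
  | succ n ih =>
    match l with
    | [] => simp [pvGoB, pvTokA, pvFlushB]
    | c :: rest =>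
      have hr : rest.length ≤ n := Nat.le_of_succ_le_succ hl
      by_cases hk : c = 'k' ∨ c = 'c' ∨ c = 'f'
      · rw [pvTokA, if_pos hk]
        rcases hk with h | h | h <;> subst h
        · have h1 : pvGoB ('k'::rest) none [] = pvGoB rest none ["Check".toList] := by
            simp [pvGoB, pvFlushB]
          rw [h1, pvGoB_acc, ih rest hr]
          have h2 : pvActionLabel ['k'] = "Check".toList := by decide
          simp [h2]
        · have h1 : pvGoB ('c'::rest) none [] = pvGoB rest none ["Call".toList] := by
            simp [pvGoB, pvFlushB]
          rw [h1, pvGoB_acc, ih rest hr]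
          have h2 : pvActionLabel ['c'] = "Call".toList := by decide
          simp [h2]
        · have h1 : pvGoB ('f'::rest) none [] = pvGoB rest none ["Fold".toList] := by
            simp [pvGoB, pvFlushB]
          rw [h1, pvGoB_acc, ih rest hr]
          have h2 : pvActionLabel ['f'] = "Fold".toList := by decide
          simp [h2]
      · by_cases hb : c = 'b' ∨ c = 'r'
        · rw [pvTokA, if_neg hk, if_pos hb]
          have hd : (rest.dropWhile pvRunChar).length ≤ n :=
            le_trans (rest.length_dropWhile_le pvRunChar) hr
          rcases hb with h | h <;> subst h
          · have h1 : pvGoB ('b'::rest) none [] = pvGoB rest (some ("Bet".toList, [])) [] := by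
              simp [pvGoB, pvFlushB]
            rw [h1, pvGoB_pend, List.nil_append, pvLabB, ih _ hd]
            simp
          · have h1 : pvGoB ('r'::rest) none [] = pvGoB rest (some ("Raise".toList, [])) [] := by
              simp [pvGoB, pvFlushB]
            rw [h1, pvGoB_pend, List.nil_append, pvLabR, ih _ hd]
            simp
        · rw [pvTokA, if_neg hk, if_neg hb]
          push Not at hk hb
          have h1 : pvGoB (c::rest) none [] = pvGoB rest none [PySem.Chars.upper [c]] := by
            simp [pvGoB, pvFlushB, hk.1, hk.2.1, hk.2.2, hb.1, hb.2]
          rw [h1, pvGoB_acc, ih rest hr]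
          have h2 : pvActionLabel [c] = PySem.Chars.upper [c] := by
            simp [pvActionLabel, hk.1, hk.2.1, hk.2.2, hb.1, hb.2]
          simp [h2]

-- ===== VERDICT (by name: the statement is the Claim_ definition above) =====
theorem pretty_seq_spec : Claim_equal_pretty_seq := by
  intro seq _
  unfold Spec_pretty_seq pretty_seq pretty_seq_alt
  split
  · rfl
  · rw [pvMain seq.toList.length seq.toList le_rfl]
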